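-- pv_equiv track=rewrite | github.com/pypi-data/pypi-mirror-160 | packages/string-to-markdown-id/string_to_markdown_id-0.0.1-py3-none-any.whl/string_to_markdown_id/__init__.py | manageDuplicates
-- ===== SOURCE A (Python) =====
-- from collections import Counter
-- from typing import List, Union
--
-- def manageDuplicates(generated: List[str]) -> List[str]:
--     """Rule 5. If a header with the same ID has already been generated, a unique incrementing number is appended, starting at 1."""
--     generatedCounter = Counter(generated)
--
--     for i in range(len(generated) - 1, -1, -1):
--         query = generated[i]
--         count = generatedCounter[query]
--         if count > 1:
--             generated[i] += f"-{count - 1}"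
--             generatedCounter[query] -= 1
--
--     return generated
-- ===== SOURCE B (Python) =====
-- def manageDuplicates(generated):
--     """Rule 5. If a header with the same ID has already been generated, a unique incrementing number is appended, starting at 1."""
--     seen = {}
--     for i, s in enumerate(generated):
--         c = seen.get(s, 0)
--         if c > 0:
--             generated[i] = f"{s}-{c}"
--         seen[s] = c + 1
--     return generated
-- ===== Notes on version B (the rewrite author's own statement) =====
-- stated objective: simpler
-- what changed: Replaces the precomputed Counter plus backward index walk with decrementing counts by a single forward pass keeping a dict of occurrences seen so far (suffix = number of earlier occurrences); same in-place mutation and return value.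
import Mathlib
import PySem

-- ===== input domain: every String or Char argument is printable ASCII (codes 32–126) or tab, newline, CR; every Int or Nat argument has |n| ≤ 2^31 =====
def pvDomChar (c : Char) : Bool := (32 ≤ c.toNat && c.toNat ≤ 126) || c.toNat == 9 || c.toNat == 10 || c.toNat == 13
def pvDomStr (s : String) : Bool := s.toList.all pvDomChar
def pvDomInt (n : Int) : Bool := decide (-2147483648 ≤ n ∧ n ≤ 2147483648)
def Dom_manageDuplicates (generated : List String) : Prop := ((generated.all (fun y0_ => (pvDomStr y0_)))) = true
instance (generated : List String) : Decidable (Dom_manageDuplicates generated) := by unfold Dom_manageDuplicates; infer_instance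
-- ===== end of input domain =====

-- B replaces A's Counter precomputation + backward decrementing index walk by one forward pass
-- keeping a dict of occurrences seen so far (simpler decomposition, same cost). In Python both
-- A and B mutate the input list in place; the equivalence proved here is about the return value.

-- ===== PORT A =====
-- one iteration of 'for i in range(len(generated) - 1, -1, -1)' at index i
-- (generated[i] is always in range in this loop, so the pyGetD default "" is never used)
def mdStep (st : List String × PySem.Dict String Int) (i : Nat) :
    List String × PySem.Dict String Int :=
  let g := st.1
  let d := st.2
  let query := PySem.List.pyGetD g (i : Int) ""
  let count := d.getD query 0
  if count > 1 then
    (g.set i (query ++ "-" ++ PySem.Int.toStr (count - 1)), d.insert query (count - 1))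
  else (g, d)

-- the backward loop: mdLoop k st runs the body at indices k-1, k-2, …, 0
def mdLoop : Nat → List String × PySem.Dict String Int → List String × PySem.Dict String Int
  | 0, st => st
  | k+1, st => mdLoop k (mdStep st k)

def manageDuplicates (generated : List String) : List String :=
  (mdLoop generated.length (generated, PySem.Dict.counter generated)).1

-- ===== PORT B =====
-- forward pass; 'seen' holds, for each string, how many times it occurred earlier
-- (B's in-place write 'generated[i] = …' at the current position is rebuilding the list)
def altGo (seen : PySem.Dict String Int) : List String → List String
  | [] => []
  | s :: rest =>
    let c := seen.getD s 0
    (if c > 0 then s ++ "-" ++ PySem.Int.toStr c else s) :: altGo (seen.insert s (c + 1)) rest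

def manageDuplicates_alt (generated : List String) : List String :=
  altGo PySem.Dict.empty generated

-- ===== PRECONDITION & SPEC =====
def Spec_manageDuplicates (generated : List String) (out : List String) : Prop := out = manageDuplicates_alt generated
instance (generated : List String) (out : List String) : Decidable (Spec_manageDuplicates generated out) := by unfold Spec_manageDuplicates; infer_instance

-- ===== CLAIM (what is proved, stated in full; the proofs are below) =====
def Claim_equal_manageDuplicates : Prop := ∀ (generated : List String), Dom_manageDuplicates generated → Spec_manageDuplicates generated (manageDuplicates generated)

-- ===== LEMMAS AND PROOFS =====

-- the common value of entry j: the original string, decorated with the number of earlier occurrences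
def dec (s : String) (c : Int) : String := if c > 0 then s ++ "-" ++ PySem.Int.toStr c else s

theorem altGo_length (seen : PySem.Dict String Int) (g : List String) :
    (altGo seen g).length = g.length := by
  induction g generalizing seen with
  | nil => rfl
  | cons s rest ih => simp [altGo, ih]

-- B's pass pointwise: entry j is g[j] decorated with seen[g[j]] + (occurrences of g[j] before j)
theorem altGo_getD (g : List String) :
    ∀ (seen : PySem.Dict String Int) (j : Nat), j < g.length →
      (altGo seen g).getD j "" =
        dec (g.getD j "") (seen.getD (g.getD j "") 0 + ((g.take j).count (g.getD j "") : Int)) := by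
  induction g with
  | nil => intro seen j hj; simp at hj
  | cons s rest ih =>
    intro seen j hj
    cases j with
    | zero => simp [altGo, dec]
    | succ j =>
      have hj' : j < rest.length := by simpa using hj
      have := ih (seen.insert s (seen.getD s 0 + 1)) j hj'
      simp only [altGo, List.getD_cons_succ, List.take_succ_cons, List.count_cons] at this ⊢
      rw [this, PySem.Dict.getD_insert]
      congr 1
      by_cases h : rest.getD j "" = s
      · simp only [h, beq_self_eq_true, if_true]; push_cast; ring
      · simp only [if_neg h, beq_eq_false_iff_ne.mpr (Ne.symm h), Bool.false_eq_true, if_false]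
        push_cast; ring

-- A's backward loop: with k indices left, entries ≥ k are final, entries < k are still original,
-- and the counter holds the multiplicities of the length-k prefix (for strings occurring in it)
theorem mdLoop_getD (g0 : List String) :
    ∀ (k : Nat) (g : List String) (d : PySem.Dict String Int),
      k ≤ g0.length →
      g.length = g0.length →
      (∀ j, j < k → g.getD j "" = g0.getD j "") →
      (∀ j, k ≤ j → j < g0.length →
        g.getD j "" = dec (g0.getD j "") (((g0.take j).count (g0.getD j "") : Int))) →
      (∀ s, 0 < (g0.take k).count s → d.getD s 0 = (((g0.take k).count s : Nat) : Int)) →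
      (mdLoop k (g, d)).1.length = g0.length ∧
      ∀ j, j < g0.length →
        (mdLoop k (g, d)).1.getD j "" = dec (g0.getD j "") (((g0.take j).count (g0.getD j "") : Int)) := by
  intro k
  induction k with
  | zero =>
    intro g d _ hlen _ hpost _
    exact ⟨hlen, fun j hj => hpost j (Nat.zero_le j) hj⟩
  | succ k ih =>
    intro g d hk hlen hpre hpost hd
    have hkl : k < g0.length := by omega
    have hkg : k < g.length := by omega
    have hq : PySem.List.pyGetD g (k : Int) "" = g0.getD k "" := by
      rw [PySem.List.pyGetD_natCast, hpre k (Nat.lt_succ_self k)]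
    set q := g0.getD k "" with hqdef
    have htake : g0.take (k+1) = g0.take k ++ [q] := by
      rw [List.take_add_one]
      simp [List.getElem?_eq_getElem hkl, hqdef]
    have hcnt : (g0.take (k+1)).count q = (g0.take k).count q + 1 := by
      rw [htake]; simp
    have hcount : d.getD q 0 = (((g0.take (k+1)).count q : Nat) : Int) := hd q (by omega)
    have hcnt_ne : ∀ s, s ≠ q → (g0.take (k+1)).count s = (g0.take k).count s := by
      intro s hs
      rw [htake, List.count_append, List.count_singleton]
      simp [Ne.symm hs]
    simp only [mdLoop]
    by_cases hbig : d.getD q 0 > 1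
    · -- duplicate: rewrite the entry, decrement the counter
      have hstep : mdStep (g, d) k =
          (g.set k (q ++ "-" ++ PySem.Int.toStr (d.getD q 0 - 1)), d.insert q (d.getD q 0 - 1)) := by
        simp only [mdStep, hq]
        rw [if_pos hbig]
      rw [hstep]
      have hprevpos : 0 < (g0.take k).count q := by omega
      have hc1 : d.getD q 0 - 1 = (((g0.take k).count q : Nat) : Int) := by
        rw [hcount, hcnt]; push_cast; ring
      have hdecval : q ++ "-" ++ PySem.Int.toStr (d.getD q 0 - 1)
          = dec q (((g0.take k).count q : Nat) : Int) := by
        rw [hc1, dec, if_pos (by exact_mod_cast hprevpos)]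
      apply ih
      · omega
      · simpa using hlen
      · intro j hj
        rw [List.getD_eq_getElem?_getD, List.getElem?_set_ne (by omega),
          ← List.getD_eq_getElem?_getD]
        exact hpre j (by omega)
      · intro j hkj hjl
        rcases eq_or_lt_of_le hkj with hjk | hjk
        · subst hjk
          rw [List.getD_eq_getElem?_getD, List.getElem?_set_self hkg, Option.getD_some, hdecval]
        · rw [List.getD_eq_getElem?_getD, List.getElem?_set_ne (by omega),
            ← List.getD_eq_getElem?_getD]
          exact hpost j (by omega) hjl
      · intro s hs
        rw [PySem.Dict.getD_insert]
        by_cases hsq : s = q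
        · rw [if_pos hsq, hsq, hc1]
        · rw [if_neg hsq]
          rw [← hcnt_ne s hsq] at hs ⊢
          exact hd s hs
    · -- the entry at k is unique so far: nothing changes
      have hstep : mdStep (g, d) k = (g, d) := by
        simp only [mdStep, hq]
        rw [if_neg hbig]
      rw [hstep]
      have hzero : (g0.take k).count q = 0 := by omega
      apply ih
      · omega
      · exact hlen
      · intro j hj; exact hpre j (by omega)
      · intro j hkj hjl
        rcases eq_or_lt_of_le hkj with hjk | hjk
        · subst hjk
          rw [hpre _ (Nat.lt_succ_self _), ← hqdef, hzero, dec]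
          norm_num
        · exact hpost j (by omega) hjl
      · intro s hs
        have hsq : s ≠ q := by intro h; rw [h] at hs; omega
        rw [← hcnt_ne s hsq] at hs ⊢
        exact hd s hs

-- ===== VERDICT (by name: the statement is the Claim_ definition above) =====
theorem manageDuplicates_spec : Claim_equal_manageDuplicates := by
  intro g _
  show manageDuplicates g = manageDuplicates_alt g
  have hA := mdLoop_getD g g.length g (PySem.Dict.counter g) le_rfl rfl
    (fun j _ => rfl)
    (fun j hj hj' => absurd hj' (by omega))
    (fun s _ => by simp [PySem.Dict.getD_counter])
  have hAlen : (manageDuplicates g).length = g.length := hA.1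
  have hBlen : (manageDuplicates_alt g).length = g.length := altGo_length _ _
  apply List.ext_getElem (by rw [hAlen, hBlen])
  intro j h1 h2
  have hj : j < g.length := by omega
  have e1 : (manageDuplicates g).getD j "" = dec (g.getD j "") (((g.take j).count (g.getD j "") : Int)) := hA.2 j hj
  have e2 : (manageDuplicates_alt g).getD j "" = dec (g.getD j "") (((g.take j).count (g.getD j "") : Int)) := by
    have := altGo_getD g PySem.Dict.empty j hj
    simpa [manageDuplicates_alt, PySem.Dict.getD_empty] using this
  rw [List.getD_eq_getElem _ _ h1] at e1
  rw [List.getD_eq_getElem _ _ h2] at e2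
  rw [e1, e2]
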